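-- pv_equiv track=rewrite | github.com/DataSuperman/TextSegmentationFromImages | progress5/splitter.py | buildCluster
-- ===== SOURCE A (Python) =====
-- def buildCluster(candidates, minCutWidth):
--     foundClusters = []
--
--     clusterStart = None
--     for index, value in enumerate(candidates):
--         if value:
--             if clusterStart is None:
--                 clusterStart = index
--         else:
--             if clusterStart is not None:
--                 clusterLength = index - clusterStart
--                 if clusterLength >= minCutWidth:
--                     foundClusters.append((clusterStart, clusterLength))
--             clusterStart = None
--
--     if clusterStart is not None:
--         clusterLength = len(candidates) - clusterStart
--         if clusterLength >= minCutWidth: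
--             foundClusters.append((clusterStart, clusterLength))
--
--     return foundClusters
-- ===== SOURCE B (Python) =====
-- def buildCluster(candidates, minCutWidth):
--     # Edge detection in two staged passes: rising edges (run starts) and
--     # falling edges (run ends), then pair them up and filter by width.
--     flags = [bool(v) for v in candidates]
--     n = len(flags)
--     starts = [i for i in range(n) if flags[i] and (i == 0 or not flags[i - 1])]
--     ends = [i + 1 for i in range(n) if flags[i] and (i == n - 1 or not flags[i + 1])]
--     return [(s, e - s) for s, e in zip(starts, ends) if e - s >= minCutWidth]
-- ===== Notes on version B (the rewrite author's own statement) =====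
-- stated objective: alternative
-- what changed: Replaced the stateful single-pass run scanner (clusterStart sentinel plus duplicated trailing-run block) with boundary detection: two staged passes compute rising-edge and falling-edge index lists, which are zipped into (start, length) pairs and filtered by width.
import Mathlib
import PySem

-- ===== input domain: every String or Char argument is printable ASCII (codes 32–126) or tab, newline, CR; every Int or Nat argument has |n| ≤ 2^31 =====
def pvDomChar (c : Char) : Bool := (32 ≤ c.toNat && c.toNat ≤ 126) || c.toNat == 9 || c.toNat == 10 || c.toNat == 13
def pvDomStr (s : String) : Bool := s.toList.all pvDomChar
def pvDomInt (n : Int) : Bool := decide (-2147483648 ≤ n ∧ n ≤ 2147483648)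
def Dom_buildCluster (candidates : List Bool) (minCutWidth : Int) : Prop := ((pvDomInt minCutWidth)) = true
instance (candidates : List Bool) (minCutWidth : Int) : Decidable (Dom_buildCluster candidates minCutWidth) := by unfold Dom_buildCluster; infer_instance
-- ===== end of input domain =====

-- B replaces A's stateful run scanner (clusterStart sentinel + duplicated trailing-run
-- block) by boundary detection: two staged passes over the indices collect rising-edge
-- and falling-edge positions, zipped into (start, length) pairs and filtered by width.

-- ===== PORT A =====
-- A's loop as structural recursion over the same state (index, clusterStart);
-- emitted pairs are returned front-to-back in A's append order.
def buildClusterGo (xs : List Bool) (index : Int) (clusterStart : Option Int)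
    (minCutWidth : Int) : Option Int × List (Int × Int) :=
  match xs with
  | [] => (clusterStart, [])
  | value :: rest =>
    if value then
      match clusterStart with
      | none => buildClusterGo rest (index + 1) (some index) minCutWidth
      | some s => buildClusterGo rest (index + 1) (some s) minCutWidth
    else
      match clusterStart with
      | some s =>
        let clusterLength := index - s
        let r := buildClusterGo rest (index + 1) none minCutWidth
        (r.1, (if clusterLength ≥ minCutWidth then [(s, clusterLength)] else []) ++ r.2)
      | none => buildClusterGo rest (index + 1) none minCutWidth

def buildCluster (candidates : List Bool) (minCutWidth : Int) : List (Int × Int) :=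
  let r := buildClusterGo candidates 0 none minCutWidth
  r.2 ++
    (match r.1 with
     | some s =>
       let clusterLength := (candidates.length : Int) - s
       if clusterLength ≥ minCutWidth then [(s, clusterLength)] else []
     | none => [])

-- ===== PORT B =====
-- Source B's comprehension conditions: flags[i] is getD (indices drawn from range flags.length,
-- so always in range = exact); `i == 0 or not flags[i-1]` keeps Python's short-circuit order.
def pvStartP (flags : List Bool) (i : Nat) : Bool :=
  flags.getD i false && (i == 0 || !(flags.getD (i - 1) false))

def pvEndP (flags : List Bool) (i : Nat) : Bool :=
  flags.getD i false && (i == flags.length - 1 || !(flags.getD (i + 1) false))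

-- bool(v) on a Bool is the identity, so `flags = candidates`.
def buildCluster_alt (candidates : List Bool) (minCutWidth : Int) : List (Int × Int) :=
  let flags := candidates
  let starts := (List.range flags.length).filter (pvStartP flags)
  let ends : List Nat := ((List.range flags.length).filter (pvEndP flags)).map (fun i => i + 1)
  (starts.zip ends).filterMap (fun p =>
    if ((p.2 : Int) - (p.1 : Int)) ≥ minCutWidth then some (((p.1 : Nat) : Int), (p.2 : Int) - (p.1 : Int)) else none)

-- ===== PRECONDITION & SPEC =====
def Spec_buildCluster (candidates : List Bool) (minCutWidth : Int) (out : List (Int × Int)) : Prop := out = buildCluster_alt candidates minCutWidth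
instance (candidates : List Bool) (minCutWidth : Int) (out : List (Int × Int)) : Decidable (Spec_buildCluster candidates minCutWidth out) := by unfold Spec_buildCluster; infer_instance

-- ===== CLAIM (what is proved, stated in full; the proofs are below) =====
def Claim_equal_buildCluster : Prop := ∀ (candidates : List Bool) (minCutWidth : Int), Dom_buildCluster candidates minCutWidth → Spec_buildCluster candidates minCutWidth (buildCluster candidates minCutWidth)

-- ===== LEMMAS AND PROOFS =====

-- Canonical run-decomposition recursion; both ports are reduced to it.
def bcRuns (xs : List Bool) (clusterStart minCutWidth : Int) : List (Int × Int) :=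
  match xs with
  | [] => []
  | key :: t =>
    let clusterLength : Int := 1 + ((t.takeWhile (· == key)).length : Int)
    (if key = true ∧ clusterLength ≥ minCutWidth then [(clusterStart, clusterLength)] else []) ++
      bcRuns (t.dropWhile (· == key)) (clusterStart + clusterLength) minCutWidth
termination_by xs.length
decreasing_by
  have := List.length_dropWhile_le (p := (· == key)) (l := t)
  simp at *; omega

-- A's trailing-run block, as a function of the final clusterStart.
def bcFinish (cs : Option Int) (len minCutWidth : Int) : List (Int × Int) :=
  match cs with
  | some s => if len - s ≥ minCutWidth then [(s, len - s)] else []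
  | none => []

lemma runsGo_false (t : List Bool) (i m : Int) :
    bcRuns (false :: t) i m = bcRuns t (i + 1) m := by
  cases t with
  | nil => simp [bcRuns]
  | cons b t' =>
    cases b with
    | true => simp [bcRuns]
    | false =>
      show bcRuns (false :: false :: t') i m = bcRuns (false :: t') (i+1) m
      rw [bcRuns, bcRuns]
      simp [List.takeWhile, List.dropWhile]
      ring_nf

lemma bc_main (xs : List Bool) :
    (∀ i m, (buildClusterGo xs i none m).2 ++
        bcFinish (buildClusterGo xs i none m).1 (i + xs.length) m =
      bcRuns xs i m) ∧
    (∀ i s m, (buildClusterGo xs i (some s) m).2 ++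
        bcFinish (buildClusterGo xs i (some s) m).1 (i + xs.length) m =
      (if i + ((xs.takeWhile (· == true)).length : Int) - s ≥ m then
          [(s, i + ((xs.takeWhile (· == true)).length : Int) - s)] else []) ++
        bcRuns (xs.dropWhile (· == true)) (i + ((xs.takeWhile (· == true)).length : Int)) m) := by
  induction xs with
  | nil => simp [buildClusterGo, bcRuns, bcFinish]
  | cons v t ih =>
    cases v with
    | false =>
      have hl : ∀ i : Int, i + (((false::t) : List Bool).length : Int) = (i+1) + (t.length : Int) := by
        intro i; push_cast [List.length_cons]; ring
      constructor
      · intro i m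
        have e1 : buildClusterGo (false::t) i none m = buildClusterGo t (i+1) none m := by
          simp [buildClusterGo]
        rw [e1, runsGo_false, hl]
        exact ih.1 (i+1) m
      · intro i s m
        have e1 : buildClusterGo (false::t) i (some s) m =
            ((buildClusterGo t (i+1) none m).1,
              (if i - s ≥ m then [(s, i - s)] else []) ++ (buildClusterGo t (i+1) none m).2) := by
          simp [buildClusterGo]
        rw [e1,
          show ((false::t).takeWhile (· == true)) = ([] : List Bool) from rfl,
          show ((false::t).dropWhile (· == true)) = false::t from rfl,
          runsGo_false]
        simp only [List.length_nil, Nat.cast_zero, add_zero]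
        rw [hl, List.append_assoc, ih.1 (i+1) m]
    | true =>
      have hl : ∀ i : Int, i + (((true::t) : List Bool).length : Int) = (i+1) + (t.length : Int) := by
        intro i; push_cast [List.length_cons]; ring
      constructor
      · intro i m
        have e1 : buildClusterGo (true::t) i none m = buildClusterGo t (i+1) (some i) m := by
          simp [buildClusterGo]
        rw [e1, hl, ih.2 (i+1) i m, bcRuns]
        set k : Int := ((t.takeWhile (· == true)).length : Int) with hk
        rw [show i + 1 + k - i = 1 + k by ring, show i + (1 + k) = i + 1 + k by ring]
        simp
      · intro i s m
        have e1 : buildClusterGo (true::t) i (some s) m = buildClusterGo t (i+1) (some s) m := by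
          simp [buildClusterGo]
        rw [e1, hl, ih.2 (i+1) s m]
        rw [show ((true::t).takeWhile (· == true)) = true :: t.takeWhile (· == true) from rfl,
          show ((true::t).dropWhile (· == true)) = t.dropWhile (· == true) from rfl]
        set k : Int := ((t.takeWhile (· == true)).length : Int) with hk
        rw [show i + ((true :: t.takeWhile (· == true) : List Bool).length : Int) = i + 1 + k by rw [hk]; push_cast [List.length_cons]; ring]

-- ---------- B side: boundary lists in recursive form ----------

def bcStartsIdx (flags : List Bool) : List Nat := (List.range flags.length).filter (pvStartP flags)
def bcEndsIdx (flags : List Bool) : List Nat := (List.range flags.length).filter (pvEndP flags)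
-- non-initial run starts
def bcStarts' (flags : List Bool) : List Nat :=
  (List.range flags.length).filter (fun i => pvStartP flags i && !(i == 0))

lemma startP_shift (b : Bool) (t : List Bool) (i : Nat) :
    pvStartP (b :: t) (i + 1) = (pvStartP t i && !(i == 0 && b)) := by
  unfold pvStartP
  cases i with
  | zero => simp
  | succ j => simp

lemma endP_shift (b : Bool) (t : List Bool) (i : Nat) (hi : i < t.length) :
    pvEndP (b :: t) (i + 1) = pvEndP t i := by
  unfold pvEndP
  have h2 : ((i + 1 : Nat) == (b :: t).length - 1) = ((i : Nat) == t.length - 1) := by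
    rw [Bool.eq_iff_iff]; simp; omega
  simp only [List.getD_cons_succ, h2]

lemma startsIdx_cons (b : Bool) (t : List Bool) :
    bcStartsIdx (b :: t) =
      (if b then [0] else []) ++
        ((List.range t.length).filter (fun i => pvStartP t i && !(i == 0 && b))).map Nat.succ := by
  unfold bcStartsIdx
  rw [List.length_cons, List.range_succ_eq_map, List.filter_cons, List.filter_map]
  have h : ∀ i ∈ List.range t.length,
      (pvStartP (b :: t) ∘ Nat.succ) i = (fun i => pvStartP t i && !(i == 0 && b)) i :=
    fun i _ => startP_shift b t i
  rw [List.filter_congr h]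
  have h0 : pvStartP (b :: t) 0 = b := by
    unfold pvStartP; cases b <;> simp
  rw [h0]
  cases b <;> simp

lemma starts'_cons (b : Bool) (t : List Bool) :
    bcStarts' (b :: t) =
      ((List.range t.length).filter (fun i => pvStartP t i && !(i == 0 && b))).map Nat.succ := by
  unfold bcStarts'
  rw [List.length_cons, List.range_succ_eq_map, List.filter_cons, List.filter_map]
  have h1 : ∀ i ∈ List.range t.length,
      ((fun i => pvStartP (b :: t) i && !(i == 0)) ∘ Nat.succ) i
        = (fun i => pvStartP t i && !(i == 0 && b)) i := by
    intro i _
    simp only [Function.comp]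
    rw [startP_shift b t i]
    simp
  rw [List.filter_congr h1]
  simp

lemma endsIdx_cons (b : Bool) (t : List Bool) :
    bcEndsIdx (b :: t) =
      (if pvEndP (b :: t) 0 then [0] else []) ++ (bcEndsIdx t).map Nat.succ := by
  unfold bcEndsIdx
  rw [List.length_cons, List.range_succ_eq_map, List.filter_cons, List.filter_map]
  have h : ∀ i ∈ List.range t.length, (pvEndP (b :: t) ∘ Nat.succ) i = pvEndP t i :=
    fun i hi => endP_shift b t i (List.mem_range.mp hi)
  rw [List.filter_congr h]
  cases h0 : pvEndP (b :: t) 0 <;> simp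

lemma startsIdx_false (t : List Bool) :
    bcStartsIdx (false :: t) = (bcStartsIdx t).map Nat.succ := by
  rw [startsIdx_cons]
  simp [bcStartsIdx]

lemma startsIdx_true (t : List Bool) :
    bcStartsIdx (true :: t) = 0 :: (bcStarts' t).map Nat.succ := by
  rw [startsIdx_cons]
  simp [bcStarts']

lemma starts'_false (t : List Bool) :
    bcStarts' (false :: t) = (bcStartsIdx t).map Nat.succ := by
  rw [starts'_cons]
  simp [bcStartsIdx]

lemma starts'_true (t : List Bool) :
    bcStarts' (true :: t) = (bcStarts' t).map Nat.succ := by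
  rw [starts'_cons]
  simp [bcStarts']

lemma starts'_run (t : List Bool) :
    bcStarts' t = (bcStartsIdx (t.dropWhile (· == true))).map
      (fun i => i + (t.takeWhile (· == true)).length) := by
  induction t with
  | nil => simp [bcStarts', bcStartsIdx]
  | cons b u ih =>
    cases b with
    | false =>
      rw [starts'_false,
        show (false :: u).takeWhile (· == true) = [] from rfl,
        show (false :: u).dropWhile (· == true) = false :: u from rfl,
        startsIdx_false]
      simp
    | true =>
      rw [starts'_true, ih,
        show (true :: u).takeWhile (· == true) = true :: u.takeWhile (· == true) from rfl,
        show (true :: u).dropWhile (· == true) = u.dropWhile (· == true) from rfl]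
      simp only [List.map_map, List.length_cons]
      apply List.map_congr_left
      intro a _
      simp only [Function.comp]
      omega

lemma endsIdx_run (t : List Bool) :
    bcEndsIdx (true :: t) =
      (t.takeWhile (· == true)).length ::
        (bcEndsIdx (t.dropWhile (· == true))).map
          (fun i => i + (1 + (t.takeWhile (· == true)).length)) := by
  induction t with
  | nil => simp [bcEndsIdx, pvEndP]
  | cons b u ih =>
    cases b with
    | false =>
      rw [endsIdx_cons]
      have h0 : pvEndP (true :: false :: u) 0 = true := by
        simp [pvEndP]
      rw [h0,
        show (false :: u).takeWhile (· == true) = [] from rfl,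
        show (false :: u).dropWhile (· == true) = false :: u from rfl]
      simp only [if_true, List.cons_append, List.nil_append, List.length_nil]
    | true =>
      rw [endsIdx_cons]
      have h0 : pvEndP (true :: true :: u) 0 = false := by
        simp [pvEndP]
      rw [h0, ih,
        show (true :: u).takeWhile (· == true) = true :: u.takeWhile (· == true) from rfl,
        show (true :: u).dropWhile (· == true) = u.dropWhile (· == true) from rfl]
      simp only [Bool.false_eq_true, if_false, List.nil_append, List.map_cons, List.map_map,
        List.length_cons]
      congr 1

-- the filterMap body of buildCluster_alt, with a running start offset
def bcF (i m : Int) (p : Nat × Nat) : Option (Int × Int) :=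
  if ((p.2 : Int) - (p.1 : Int)) ≥ m then some (((p.1 : Nat) : Int) + i, (p.2 : Int) - (p.1 : Int)) else none

lemma bc_zip_runs (n : Nat) : ∀ (xs : List Bool), xs.length ≤ n → ∀ (i m : Int),
    ((bcStartsIdx xs).zip ((bcEndsIdx xs).map (fun j => j + 1))).filterMap (bcF i m)
      = bcRuns xs i m := by
  induction n with
  | zero =>
    intro xs hxs i m
    have : xs = [] := List.length_eq_zero_iff.mp (Nat.le_zero.mp hxs)
    subst this
    simp [bcStartsIdx, bcEndsIdx, bcRuns]
  | succ n ih =>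
    intro xs hxs i m
    match xs with
    | [] => simp [bcStartsIdx, bcEndsIdx, bcRuns]
    | false :: t =>
      rw [startsIdx_false, endsIdx_cons]
      have h0 : pvEndP (false :: t) 0 = false := by simp [pvEndP]
      rw [h0]
      simp only [if_neg Bool.false_ne_true, List.nil_append, List.map_map]
      rw [show ((fun j => j + 1) ∘ Nat.succ) = (Nat.succ ∘ fun j => j + 1) from rfl,
        ← List.map_map, List.zip_map, List.filterMap_map]
      have hf : (bcF i m ∘ Prod.map Nat.succ Nat.succ) = bcF (i + 1) m := by
        funext p
        obtain ⟨s, e⟩ := p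
        simp only [Function.comp, Prod.map, bcF, Nat.succ_eq_add_one]
        push_cast
        rw [show (e : Int) + 1 - ((s : Int) + 1) = (e : Int) - (s : Int) by ring]
        split_ifs with h
        · rw [show ((s : Int) + 1 + i) = (s : Int) + (i + 1) by ring]
        · rfl
      rw [hf, ih t (by simpa using Nat.lt_succ_iff.mp (by simpa using hxs)) (i + 1) m,
        runsGo_false]
    | true :: t =>
      rw [startsIdx_true, starts'_run, endsIdx_run]
      set k : Nat := (t.takeWhile (· == true)).length with hk
      set rest : List Bool := t.dropWhile (· == true) with hrest
      have hrl : rest.length ≤ n := by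
        have h1 : rest.length ≤ t.length := List.length_dropWhile_le _ _
        have h2 : t.length ≤ n := by simpa using Nat.lt_succ_iff.mp (by simpa using hxs)
        omega
      simp only [List.map_map, List.map_cons, List.zip_cons_cons, List.filterMap_cons]
      rw [List.zip_map, List.filterMap_map]
      have hih := ih rest hrl (i + (1 + (k : Int))) m
      rw [List.zip_map_right, List.filterMap_map] at hih
      have hf : (bcF i m ∘ Prod.map (Nat.succ ∘ fun i => i + k) ((fun j => j + 1) ∘ fun i => i + (1 + k)))
          = (bcF (i + (1 + (k : Int))) m ∘ Prod.map id fun j => j + 1) := by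
        funext p
        obtain ⟨s, e⟩ := p
        simp only [Function.comp, Prod.map, bcF, id, Nat.succ_eq_add_one]
        push_cast
        rw [show ((e : Int) + (1 + (k : Int)) + 1 - ((s : Int) + (k : Int) + 1)) = (e : Int) + 1 - (s : Int) by ring]
        split_ifs with h
        · simp only [Option.some.injEq, Prod.mk.injEq]
          exact ⟨by omega, trivial⟩
        · rfl
      rw [hf, hih]
      rw [bcRuns]
      simp only [← hk, ← hrest]
      have hhead : bcF i m (0, k + 1) = if (1 + (k : Int)) ≥ m then some (i, 1 + (k : Int)) else none := by
        simp only [bcF]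
        push_cast
        rw [show ((k : Int) + 1 - (0 : Int)) = 1 + (k : Int) by ring,
          show ((0 : Int) + i) = i by ring]
      rw [hhead]
      by_cases h : 1 + (k : Int) ≥ m <;> simp [h]

lemma alt_eq_zip (candidates : List Bool) (m : Int) :
    buildCluster_alt candidates m
      = ((bcStartsIdx candidates).zip ((bcEndsIdx candidates).map (fun j => j + 1))).filterMap (bcF 0 m) := by
  unfold buildCluster_alt bcStartsIdx bcEndsIdx
  congr 1

-- ===== VERDICT (by name: the statement is the Claim_ definition above) =====
theorem buildCluster_spec : Claim_equal_buildCluster := by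
  intro candidates minCutWidth _
  show buildCluster candidates minCutWidth = buildCluster_alt candidates minCutWidth
  have hA := (bc_main candidates).1 0 minCutWidth
  have hB := bc_zip_runs candidates.length candidates le_rfl 0 minCutWidth
  rw [alt_eq_zip, hB, ← hA]
  simp [buildCluster, bcFinish]
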